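-- pv_equiv track=rewrite | github.com/tophercook7-maker/scout-brain | app.py | _normalize_email_subject
-- ===== SOURCE A (Python) =====
-- def _normalize_email_subject(subject: str | None) -> str:
--     normalized = str(subject or "").strip().lower()
--     while normalized.startswith("re:") or normalized.startswith("fw:") or normalized.startswith("fwd:"):
--         if normalized.startswith("re:"):
--             normalized = normalized[3:].strip()
--         elif normalized.startswith("fw:"):
--             normalized = normalized[3:].strip()
--         elif normalized.startswith("fwd:"):
--             normalized = normalized[4:].strip()
--     return " ".join(normalized.split())
-- ===== SOURCE B (Python) =====
-- # Token-level rewrite: split into words first, then trim reply/forward prefixes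
-- # off the leading tokens, instead of repeatedly re-slicing and re-stripping the
-- # whole string.
--
-- _PREFIXES = ("re:", "fw:", "fwd:")
--
--
-- def _strip_prefixes(token):
--     """Remove as many leading re:/fw:/fwd: markers as possible from one token."""
--     while True:
--         for p in _PREFIXES:
--             if token.startswith(p):
--                 token = token[len(p):]
--                 break
--         else:
--             return token
--
--
-- def _normalize_email_subject(subject: str | None) -> str:
--     tokens = (subject or "").lower().split()
--     while tokens:
--         stripped = _strip_prefixes(tokens[0])
--         if stripped == tokens[0]:
--             break
--         if stripped:
--             tokens[0] = stripped
--             break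
--         tokens.pop(0)
--     return " ".join(tokens)
-- ===== Notes on version B (the rewrite author's own statement) =====
-- stated objective: alternative
-- what changed: B tokenizes the subject once with split() and trims the reply/forward prefixes off the leading tokens, instead of A's while-loop that repeatedly re-slices and re-strips the whole string before a final split/join.
import Mathlib
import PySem

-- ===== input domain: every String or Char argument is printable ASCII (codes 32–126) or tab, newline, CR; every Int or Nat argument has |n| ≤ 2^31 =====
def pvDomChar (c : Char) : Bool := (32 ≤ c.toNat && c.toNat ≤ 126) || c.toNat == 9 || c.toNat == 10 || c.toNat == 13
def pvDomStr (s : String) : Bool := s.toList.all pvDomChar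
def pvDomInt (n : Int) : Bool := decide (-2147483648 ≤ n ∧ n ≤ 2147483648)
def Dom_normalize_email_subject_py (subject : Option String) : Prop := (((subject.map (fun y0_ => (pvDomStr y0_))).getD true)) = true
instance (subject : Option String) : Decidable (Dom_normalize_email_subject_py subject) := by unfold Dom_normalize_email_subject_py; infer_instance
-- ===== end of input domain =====

-- B tokenizes the subject once and trims reply/forward prefixes off the leading
-- tokens, instead of A's repeated whole-string re-slice/strip loop; same result.

set_option maxRecDepth 8000


-- ===== PORT A =====
-- length bounds cited by the termination proofs of the two ports
theorem pvStripLen (s : List Char) : (PySem.Chars.strip s).length ≤ s.length := by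
  unfold PySem.Chars.strip PySem.Chars.rstrip PySem.Chars.lstrip
  simp only [List.length_reverse]
  calc (List.dropWhile PySem.Chars.isspace
          (List.dropWhile PySem.Chars.isspace s).reverse).length
      ≤ (List.dropWhile PySem.Chars.isspace s).reverse.length :=
        List.length_dropWhile_le _ _
    _ = (List.dropWhile PySem.Chars.isspace s).length := List.length_reverse ..
    _ ≤ s.length := List.length_dropWhile_le _ _

theorem pvStartswithLen {s p : List Char} (h : PySem.Chars.startswith s p = true) :
    p.length ≤ s.length :=
  (List.isPrefixOf_iff_prefix.mp (by simpa [PySem.Chars.startswith] using h)).length_le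

-- the while loop of A: test "re:" / "fw:" / "fwd:" in order, slice the prefix
-- off and strip, until no prefix matches (the while condition is exactly the
-- disjunction of the three branch guards, so the if/elif chain folds into the
-- nested if below)
def pvALoop (s : List Char) : List Char :=
  if PySem.Chars.startswith s ['r', 'e', ':'] then
    pvALoop (PySem.Chars.strip (PySem.Chars.slice s (some 3) none))
  else if PySem.Chars.startswith s ['f', 'w', ':'] then
    pvALoop (PySem.Chars.strip (PySem.Chars.slice s (some 3) none))
  else if PySem.Chars.startswith s ['f', 'w', 'd', ':'] then
    pvALoop (PySem.Chars.strip (PySem.Chars.slice s (some 4) none))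
  else s
termination_by s.length
decreasing_by
  all_goals
    simp only [PySem.Chars.slice_eq_listSlice]
    rw [PySem.List.slice_from _ (by norm_num)]
    refine lt_of_le_of_lt (pvStripLen _) ?_
    have h2 := pvStartswithLen (by assumption)
    simp only [List.length_drop]
    simp at h2
    omega

def normalize_email_subject_py (subject : Option String) : String :=
  -- `str(subject or "")`: subject is str|None; None and "" both give ""
  let normalized := PySem.Chars.lower (PySem.Chars.strip (subject.getD "").toList)
  String.ofList (PySem.Chars.join [' '] (PySem.Chars.split₀ (pvALoop normalized)))

-- ===== PORT B =====
-- Source B's _strip_prefixes: the for/else over ("re:", "fw:", "fwd:") with break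
def pvStripPrefixes (t : List Char) : List Char :=
  if PySem.Chars.startswith t ['r', 'e', ':'] then pvStripPrefixes (List.drop 3 t)
  else if PySem.Chars.startswith t ['f', 'w', ':'] then pvStripPrefixes (List.drop 3 t)
  else if PySem.Chars.startswith t ['f', 'w', 'd', ':'] then pvStripPrefixes (List.drop 4 t)
  else t
termination_by t.length
decreasing_by
  all_goals
    have h2 := pvStartswithLen (by assumption)
    simp only [List.length_drop]
    simp at h2
    omega

-- Source B's while-tokens loop: examine the head token, stop when it is unchanged
-- or a nonempty remainder survives, pop it when it was prefixes only
def pvBLoop (tokens : List (List Char)) : List (List Char) :=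
  match tokens with
  | [] => []
  | t :: rest =>
    let stripped := pvStripPrefixes t
    if stripped = t then t :: rest
    else if stripped ≠ [] then stripped :: rest
    else pvBLoop rest

def normalize_email_subject_py_alt (subject : Option String) : String :=
  let tokens := PySem.Chars.split₀ (PySem.Chars.lower (subject.getD "").toList)
  String.ofList (PySem.Chars.join [' '] (pvBLoop tokens))

-- ===== PRECONDITION & SPEC =====
def Spec_normalize_email_subject_py (subject : Option String) (out : String) : Prop := out = normalize_email_subject_py_alt subject
instance (subject : Option String) (out : String) : Decidable (Spec_normalize_email_subject_py subject out) := by unfold Spec_normalize_email_subject_py; infer_instance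

-- ===== CLAIM (what is proved, stated in full; the proofs are below) =====
def Claim_equal_normalize_email_subject_py : Prop := ∀ (subject : Option String), Dom_normalize_email_subject_py subject → Spec_normalize_email_subject_py subject (normalize_email_subject_py subject)

-- ===== LEMMAS AND PROOFS =====

-- word splitter: clean recursive form of Python's str.split()
def pvWords : List Char → List (List Char)
  | [] => []
  | c :: r =>
    if PySem.Chars.isspace c then pvWords r
    else List.takeWhile (fun c => !PySem.Chars.isspace c) (c :: r) ::
      pvWords (List.dropWhile (fun c => !PySem.Chars.isspace c) r)
termination_by s => s.length
decreasing_by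
  · simp
  · have := List.length_dropWhile_le (fun c => !PySem.Chars.isspace c) r
    simp; omega

theorem pvGo_spec (s : List Char) : ∀ (cw : List Char) (acc : List (List Char)),
    PySem.Chars.split₀.go s cw acc
      = acc.reverse ++ (if cw = [] then pvWords s
          else (cw.reverse ++ List.takeWhile (fun c => !PySem.Chars.isspace c) s)
            :: pvWords (List.dropWhile (fun c => !PySem.Chars.isspace c) s)) := by
  induction s with
  | nil =>
    intro cw acc
    unfold PySem.Chars.split₀.go
    by_cases h : cw = [] <;> simp [h, pvWords, List.isEmpty_iff]
  | cons c r ih =>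
    intro cw acc
    unfold PySem.Chars.split₀.go
    by_cases hc : PySem.Chars.isspace c
    · by_cases hcw : cw = [] <;>
        simp [hc, hcw, ih, pvWords, List.takeWhile, List.dropWhile]
    · by_cases hcw : cw = [] <;>
        simp [hc, hcw, ih, pvWords, List.takeWhile, List.dropWhile]

theorem pvSplit₀_eq_words (s : List Char) : PySem.Chars.split₀ s = pvWords s := by
  have := pvGo_spec s [] []
  simpa [PySem.Chars.split₀] using this

-- equation lemmas for the word splitter
theorem pvWords_nil : pvWords [] = [] := by rw [pvWords]

theorem pvWords_cons (c : Char) (r : List Char) :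
    pvWords (c :: r) = if PySem.Chars.isspace c then pvWords r
      else List.takeWhile (fun c => !PySem.Chars.isspace c) (c :: r) ::
        pvWords (List.dropWhile (fun c => !PySem.Chars.isspace c) r) := by
  rw [pvWords]

-- head of an lstrip-fixed nonempty list is not a space
theorem pvLstrip_head {c : Char} {r : List Char}
    (h : PySem.Chars.lstrip (c :: r) = c :: r) : PySem.Chars.isspace c = false := by
  by_contra hc
  have hc' : PySem.Chars.isspace c = true := by simpa using hc
  unfold PySem.Chars.lstrip at h
  rw [List.dropWhile_cons_of_pos hc'] at h
  have h1 := List.length_dropWhile_le PySem.Chars.isspace r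
  have h2 := congrArg List.length h
  simp at h2; omega

theorem pvDropWhile_idem (p : Char → Bool) (l : List Char) :
    List.dropWhile p (List.dropWhile p l) = List.dropWhile p l := by
  induction l with
  | nil => simp
  | cons c r ih => by_cases h : p c <;> simp [List.dropWhile, h, ih]

theorem pvRstrip_prefix (l : List Char) : PySem.Chars.rstrip l <+: l := by
  unfold PySem.Chars.rstrip
  have h := List.dropWhile_suffix (l := l.reverse) PySem.Chars.isspace
  have h2 := List.reverse_prefix.mpr h
  simpa using h2

-- the strip of anything is lstrip-fixed
theorem pvLstrip_strip (u : List Char) :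
    PySem.Chars.lstrip (PySem.Chars.strip u) = PySem.Chars.strip u := by
  unfold PySem.Chars.strip
  have hzz : PySem.Chars.lstrip (PySem.Chars.lstrip u) = PySem.Chars.lstrip u :=
    pvDropWhile_idem _ u
  obtain ⟨w, hw⟩ := pvRstrip_prefix (PySem.Chars.lstrip u)
  cases hr : PySem.Chars.rstrip (PySem.Chars.lstrip u) with
  | nil => simp [PySem.Chars.lstrip]
  | cons hd tl =>
    rw [hr] at hw
    have hhd : PySem.Chars.isspace hd = false := by
      apply pvLstrip_head (r := tl ++ w)
      rw [← List.cons_append, hw]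
      exact hw ▸ hzz
    simp [PySem.Chars.lstrip, List.dropWhile, hhd]

theorem pvWords_all_space (w : List Char)
    (hw : ∀ c ∈ w, PySem.Chars.isspace c = true) : pvWords w = [] := by
  induction w with
  | nil => exact pvWords_nil
  | cons c r ih =>
    rw [pvWords_cons, if_pos (hw c (by simp))]
    exact ih (fun d hd => hw d (by simp [hd]))

theorem pvTakeWhile_app (x w : List Char)
    (hw : ∀ c ∈ w, PySem.Chars.isspace c = true) :
    List.takeWhile (fun c => !PySem.Chars.isspace c) (x ++ w)
      = List.takeWhile (fun c => !PySem.Chars.isspace c) x := by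
  induction x with
  | nil =>
    cases w with
    | nil => simp
    | cons c r => simp [List.takeWhile, hw c (by simp)]
  | cons c r ih => by_cases h : PySem.Chars.isspace c <;> simp [List.takeWhile, h, ih]

theorem pvDropWhile_app (x w : List Char)
    (hw : ∀ c ∈ w, PySem.Chars.isspace c = true) :
    List.dropWhile (fun c => !PySem.Chars.isspace c) (x ++ w)
      = List.dropWhile (fun c => !PySem.Chars.isspace c) x ++ w := by
  induction x with
  | nil =>
    cases w with
    | nil => simp
    | cons c r => simp [List.dropWhile, hw c (by simp)]
  | cons c r ih => by_cases h : PySem.Chars.isspace c <;> simp [List.dropWhile, h, ih]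

theorem pvWords_app_aux (w : List Char)
    (hw : ∀ c ∈ w, PySem.Chars.isspace c = true) :
    ∀ (n : ℕ) (x : List Char), x.length ≤ n → pvWords (x ++ w) = pvWords x := by
  intro n
  induction n with
  | zero =>
    intro x hx
    have hx0 : x = [] := by cases x <;> simp_all
    subst hx0
    simpa [pvWords_nil] using pvWords_all_space w hw
  | succ n ih =>
    intro x hx
    cases x with
    | nil => simpa [pvWords_nil] using pvWords_all_space w hw
    | cons c r =>
      rw [List.cons_append, pvWords_cons, pvWords_cons]
      by_cases h : PySem.Chars.isspace c
      · rw [if_pos h, if_pos h]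
        exact ih r (by simp at hx; omega)
      · rw [if_neg h, if_neg h]
        have ht : List.takeWhile (fun c => !PySem.Chars.isspace c) (c :: (r ++ w))
            = List.takeWhile (fun c => !PySem.Chars.isspace c) (c :: r) := by
          rw [← List.cons_append]; exact pvTakeWhile_app (c :: r) w hw
        rw [ht, pvDropWhile_app r w hw]
        have hd := List.length_dropWhile_le (fun c => !PySem.Chars.isspace c) r
        rw [ih _ (by simp at hx; omega)]

theorem pvWords_rstrip (s : List Char) :
    pvWords (PySem.Chars.rstrip s) = pvWords s := by
  have hdec : PySem.Chars.rstrip s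
      ++ (List.takeWhile PySem.Chars.isspace s.reverse).reverse = s := by
    unfold PySem.Chars.rstrip
    rw [← List.reverse_append, List.takeWhile_append_dropWhile, List.reverse_reverse]
  have hsp : ∀ c ∈ (List.takeWhile PySem.Chars.isspace s.reverse).reverse,
      PySem.Chars.isspace c = true :=
    fun c hc => List.mem_takeWhile_imp (by simpa using hc)
  calc pvWords (PySem.Chars.rstrip s)
      = pvWords (PySem.Chars.rstrip s
          ++ (List.takeWhile PySem.Chars.isspace s.reverse).reverse) :=
        (pvWords_app_aux _ hsp _ _ le_rfl).symm
    _ = pvWords s := by rw [hdec]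

theorem pvWords_lstrip (s : List Char) :
    pvWords (PySem.Chars.lstrip s) = pvWords s := by
  induction s with
  | nil => simp [PySem.Chars.lstrip]
  | cons c r ih =>
    by_cases h : PySem.Chars.isspace c
    · rw [show PySem.Chars.lstrip (c :: r) = PySem.Chars.lstrip r by
        simp [PySem.Chars.lstrip, List.dropWhile, h], ih, pvWords_cons, if_pos h]
    · rw [show PySem.Chars.lstrip (c :: r) = c :: r by
        simp [PySem.Chars.lstrip, List.dropWhile, h]]

theorem pvSplit₀_strip (s : List Char) :
    PySem.Chars.split₀ (PySem.Chars.strip s) = PySem.Chars.split₀ s := by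
  rw [pvSplit₀_eq_words, pvSplit₀_eq_words]
  unfold PySem.Chars.strip
  rw [pvWords_rstrip, pvWords_lstrip]

theorem pvStripPrefixes_len (t : List Char) :
    (pvStripPrefixes t).length ≤ t.length := by
  fun_induction pvStripPrefixes t with
  | case1 t h ih => simp only [List.length_drop] at ih ⊢; omega
  | case2 t h1 h ih => simp only [List.length_drop] at ih ⊢; omega
  | case3 t h1 h2 h ih => simp only [List.length_drop] at ih ⊢; omega
  | case4 => exact le_rfl

theorem pvStripPrefixes_nil : pvStripPrefixes [] = [] := by
  rw [pvStripPrefixes]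
  simp [PySem.Chars.startswith, List.isPrefixOf]

-- the head token changed: B pops it (empty) or keeps the remainder
theorem pvBLoop_cons_changed (p t' : List Char) (rest : List (List Char))
    (hp : pvStripPrefixes (p ++ t') = pvStripPrefixes t')
    (hlen : 0 < p.length) :
    pvBLoop ((p ++ t') :: rest)
      = pvBLoop (if t' = [] then rest else t' :: rest) := by
  have hr_le := pvStripPrefixes_len t'
  have hne : pvStripPrefixes t' ≠ p ++ t' := by
    intro h
    have := congrArg List.length h
    simp at this; omega
  by_cases ht : t' = []
  · subst ht
    have hpp : pvStripPrefixes p = [] := by simpa [pvStripPrefixes_nil] using hp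
    have hppn : p ≠ [] := by intro h; rw [h] at hlen; simp at hlen
    simp [pvBLoop, hpp, Ne.symm hppn]
  · rw [if_neg ht]
    by_cases hrt : pvStripPrefixes t' = t'
    · simp [pvBLoop, hp, hrt, ht]
    · by_cases hrn : pvStripPrefixes t' = []
      · simp [pvBLoop, hp, hrn, ht]
      · simp [pvBLoop, hp, hne, hrt, hrn]

-- dropping one whole prefix off the front of an lstrip-fixed string does not
-- change B's token-level result
theorem pvTokenDrop (p v : List Char)
    (hpns : ∀ c ∈ p, PySem.Chars.isspace c = false)
    (hpne : p ≠ [])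
    (hp : ∀ t, pvStripPrefixes (p ++ t) = pvStripPrefixes t) :
    pvBLoop (PySem.Chars.split₀ (p ++ v)) = pvBLoop (PySem.Chars.split₀ v) := by
  rw [pvSplit₀_eq_words, pvSplit₀_eq_words]
  obtain ⟨c, p', rfl⟩ : ∃ c p', p = c :: p' := by
    cases p with
    | nil => exact absurd rfl hpne
    | cons c p' => exact ⟨c, p', rfl⟩
  have hc := hpns c (by simp)
  have hallP : ∀ d ∈ (c :: p'), (fun e => !PySem.Chars.isspace e) d = true := by
    intro d hd; simp [hpns d hd]
  rw [List.cons_append, pvWords_cons, if_neg (by simp [hc])]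
  have htake : List.takeWhile (fun e => !PySem.Chars.isspace e) (c :: (p' ++ v))
      = (c :: p') ++ List.takeWhile (fun e => !PySem.Chars.isspace e) v := by
    rw [← List.cons_append]
    exact List.takeWhile_append_of_pos hallP
  have hdrop : List.dropWhile (fun e => !PySem.Chars.isspace e) (p' ++ v)
      = List.dropWhile (fun e => !PySem.Chars.isspace e) v := by
    have : ∀ d ∈ p', (fun e => !PySem.Chars.isspace e) d = true :=
      fun d hd => by simp [hpns d (by simp [hd])]
    exact List.dropWhile_append_of_pos this
  rw [htake, hdrop]
  rw [pvBLoop_cons_changed (c :: p') _ _ (hp _) (by simp)]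
  by_cases ht : List.takeWhile (fun e => !PySem.Chars.isspace e) v = []
  · rw [if_pos ht]
    have hv : List.dropWhile (fun e => !PySem.Chars.isspace e) v = v := by
      have := List.takeWhile_append_dropWhile
        (p := fun e => !PySem.Chars.isspace e) (l := v)
      rw [ht] at this; simpa using this
    rw [hv]
  · rw [if_neg ht]
    cases v with
    | nil => simp at ht
    | cons d v' =>
      have hd : PySem.Chars.isspace d = false := by
        by_contra hdc
        have hdc' : PySem.Chars.isspace d = true := by simpa using hdc
        exact ht (by simp [hdc'])
      rw [pvWords_cons, if_neg (by simp [hd])]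
      rw [show List.dropWhile (fun e => !PySem.Chars.isspace e) (d :: v')
          = List.dropWhile (fun e => !PySem.Chars.isspace e) v' by
        simp [List.dropWhile, hd]]

-- unfolding helpers for the three concrete prefixes
theorem pvStrip_re (t : List Char) :
    pvStripPrefixes (['r', 'e', ':'] ++ t) = pvStripPrefixes t := by
  rw [pvStripPrefixes]
  simp [PySem.Chars.startswith, List.isPrefixOf]

theorem pvStrip_fw (t : List Char) :
    pvStripPrefixes (['f', 'w', ':'] ++ t) = pvStripPrefixes t := by
  rw [pvStripPrefixes]
  simp [PySem.Chars.startswith, List.isPrefixOf]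

theorem pvStrip_fwd (t : List Char) :
    pvStripPrefixes (['f', 'w', 'd', ':'] ++ t) = pvStripPrefixes t := by
  rw [pvStripPrefixes]
  simp [PySem.Chars.startswith, List.isPrefixOf]

theorem pvNoSpace_pre {p : List Char}
    (hp : ∀ c ∈ p, c = 'r' ∨ c = 'e' ∨ c = 'f' ∨ c = 'w' ∨ c = 'd' ∨ c = ':') :
    ∀ c ∈ p, PySem.Chars.isspace c = false := by
  intro c hc
  rcases hp c hc with rfl | rfl | rfl | rfl | rfl | rfl <;> rfl

-- the main induction: A's whole-string loop equals B's token loop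
theorem pvMain : ∀ (n : ℕ) (u : List Char), u.length ≤ n →
    PySem.Chars.split₀ (pvALoop (PySem.Chars.strip u))
      = pvBLoop (PySem.Chars.split₀ u) := by
  intro n
  induction n with
  | zero =>
    intro u hu
    have hu0 : u = [] := by cases u <;> simp_all
    subst hu0
    rw [show PySem.Chars.strip [] = [] from rfl, pvALoop]
    simp [PySem.Chars.startswith, List.isPrefixOf, PySem.Chars.split₀,
      PySem.Chars.split₀.go, pvBLoop]
  | succ n ih =>
    intro u hu
    have hly : PySem.Chars.lstrip (PySem.Chars.strip u) = PySem.Chars.strip u :=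
      pvLstrip_strip u
    have hylen : (PySem.Chars.strip u).length ≤ u.length := pvStripLen u
    rw [pvALoop]
    split_ifs with h1 h2 h3
    · obtain ⟨v, hv⟩ : ∃ v, _ ++ v = PySem.Chars.strip u :=
        by simpa [PySem.Chars.startswith] using h1
      have hvl : v.length + 3 = (PySem.Chars.strip u).length := by
        have := congrArg List.length hv; simp at this; omega
      have hslice : PySem.Chars.slice (PySem.Chars.strip u) (some 3) none = v := by
        rw [PySem.Chars.slice_eq_listSlice,
          PySem.List.slice_from _ (by norm_num : (0:ℤ) ≤ 3), ← hv]
        rfl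
      rw [hslice, ih v (by omega), ← pvSplit₀_strip u, ← hv]
      exact (pvTokenDrop ['r', 'e', ':'] v (pvNoSpace_pre (by intro c hc; simp at hc; tauto)) (by simp) pvStrip_re).symm
    · obtain ⟨v, hv⟩ : ∃ v, _ ++ v = PySem.Chars.strip u :=
        by simpa [PySem.Chars.startswith] using h2
      have hvl : v.length + 3 = (PySem.Chars.strip u).length := by
        have := congrArg List.length hv; simp at this; omega
      have hslice : PySem.Chars.slice (PySem.Chars.strip u) (some 3) none = v := by
        rw [PySem.Chars.slice_eq_listSlice,
          PySem.List.slice_from _ (by norm_num : (0:ℤ) ≤ 3), ← hv]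
        rfl
      rw [hslice, ih v (by omega), ← pvSplit₀_strip u, ← hv]
      exact (pvTokenDrop ['f', 'w', ':'] v (pvNoSpace_pre (by intro c hc; simp at hc; tauto)) (by simp) pvStrip_fw).symm
    · obtain ⟨v, hv⟩ : ∃ v, _ ++ v = PySem.Chars.strip u :=
        by simpa [PySem.Chars.startswith] using h3
      have hvl : v.length + 4 = (PySem.Chars.strip u).length := by
        have := congrArg List.length hv; simp at this; omega
      have hslice : PySem.Chars.slice (PySem.Chars.strip u) (some 4) none = v := by
        rw [PySem.Chars.slice_eq_listSlice,
          PySem.List.slice_from _ (by norm_num : (0:ℤ) ≤ 4), ← hv]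
        rfl
      rw [hslice, ih v (by omega), ← pvSplit₀_strip u, ← hv]
      exact (pvTokenDrop ['f', 'w', 'd', ':'] v (pvNoSpace_pre (by intro c hc; simp at hc; tauto)) (by simp) pvStrip_fwd).symm
    · rw [← pvSplit₀_strip u]
      cases hcy : PySem.Chars.strip u with
      | nil =>
        simp [PySem.Chars.split₀, PySem.Chars.split₀.go, pvBLoop]
      | cons c r =>
        have hc : PySem.Chars.isspace c = false := pvLstrip_head (hcy ▸ hly)
        rw [pvSplit₀_eq_words, pvWords_cons, if_neg (by simp [hc])]
        have htp : List.takeWhile (fun e => !PySem.Chars.isspace e) (c :: r)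
            <+: PySem.Chars.strip u := hcy ▸ List.takeWhile_prefix _
        have hts : pvStripPrefixes
            (List.takeWhile (fun e => !PySem.Chars.isspace e) (c :: r))
            = List.takeWhile (fun e => !PySem.Chars.isspace e) (c :: r) := by
          rw [pvStripPrefixes]
          rw [if_neg, if_neg, if_neg]
          · intro hpre
            exact h3 (by
              simp only [PySem.Chars.startswith, List.isPrefixOf_iff_prefix] at hpre ⊢
              exact hpre.trans htp)
          · intro hpre
            exact h2 (by
              simp only [PySem.Chars.startswith, List.isPrefixOf_iff_prefix] at hpre ⊢
              exact hpre.trans htp)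
          · intro hpre
            exact h1 (by
              simp only [PySem.Chars.startswith, List.isPrefixOf_iff_prefix] at hpre ⊢
              exact hpre.trans htp)
        simp [pvBLoop, hts]

theorem pvLowerChar_isspace (c : Char) :
    PySem.Chars.isspace (PySem.Chars.lowerChar c) = PySem.Chars.isspace c := by
  unfold PySem.Chars.lowerChar PySem.Chars.isupper PySem.Chars.isspace
  split_ifs with h
  · simp only [Bool.and_eq_true, decide_eq_true_eq] at h
    have h' : 65 ≤ c.toNat ∧ c.toNat ≤ 90 := by
      obtain ⟨h1, h2⟩ := h
      rw [Char.le_def, UInt32.le_iff_toNat_le] at h1 h2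
      exact ⟨h1, h2⟩
    have hv : (c.toNat + 32).isValidChar := Or.inl (by omega)
    simp only [Char.toNat_ofNat, if_pos hv]
    have key : ∀ m : ℕ, 65 ≤ m → m ≤ 122 →
        (decide (m = 32) || decide (9 ≤ m) && decide (m ≤ 13) ||
          decide (28 ≤ m) && decide (m ≤ 31) || decide (m = 133) || decide (m = 160) ||
          decide (m = 5760) || decide (8192 ≤ m) && decide (m ≤ 8202) ||
          decide (m = 8232) || decide (m = 8233) || decide (m = 8239) ||
          decide (m = 8287) || decide (m = 12288)) = false := by
      intro m h1 h2
      rw [Bool.eq_false_iff]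
      simp only [ne_eq, Bool.or_eq_true, Bool.and_eq_true, decide_eq_true_eq]
      omega
    rw [key _ (by omega) (by omega), key _ h'.1 (by omega)]
  · rfl

theorem pvLower_strip (t : List Char) :
    PySem.Chars.lower (PySem.Chars.strip t)
      = PySem.Chars.strip (PySem.Chars.lower t) := by
  unfold PySem.Chars.lower PySem.Chars.strip PySem.Chars.rstrip PySem.Chars.lstrip
  have hpf : (PySem.Chars.isspace ∘ PySem.Chars.lowerChar) = PySem.Chars.isspace :=
    funext pvLowerChar_isspace
  simp only [List.dropWhile_map, hpf, ← List.map_reverse]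

theorem core_equiv (t : List Char) :
    PySem.Chars.join [' ']
        (PySem.Chars.split₀ (pvALoop (PySem.Chars.lower (PySem.Chars.strip t))))
      = PySem.Chars.join [' '] (pvBLoop (PySem.Chars.split₀ (PySem.Chars.lower t))) := by
  rw [pvLower_strip, pvMain (PySem.Chars.lower t).length _ le_rfl]

-- ===== VERDICT (by name: the statement is the Claim_ definition above) =====
theorem normalize_email_subject_py_spec : Claim_equal_normalize_email_subject_py := by
  intro subject _
  unfold Spec_normalize_email_subject_py normalize_email_subject_py normalize_email_subject_py_alt
  exact congrArg String.ofList (core_equiv (subject.getD "").toList)
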